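-- pv_equiv track=rewrite | github.com/tinyPlantBlobb/AdventofCode | AoC2023/day7.py | parseHand
-- ===== SOURCE A (Python) =====
-- def parseHand(cards):
--     card =""
--     l = {}
--     for c in cards:
--         amount = l.get(c, 0) +1
--         l.update({c: amount})
--         card = c
--     result = sorted(list(l.items()),key=lambda x: x[1], reverse=True)
--     return result
-- ===== SOURCE B (Python) =====
-- def parseHand(cards):
--     l = {}
--     for c in cards:
--         l[c] = l.get(c, 0) + 1
--     items = list(l.items())
--     m = 0
--     for _, v in items:
--         if v > m:
--             m = v
--     result = []
--     for k in range(m, 0, -1):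
--         for item in items:
--             if item[1] == k:
--                 result.append(item)
--     return result
-- ===== Notes on version B (the rewrite author's own statement) =====
-- stated objective: alternative
-- what changed: Replaces the comparison sort (sorted by count, reverse=True) with a counting-sort sweep: compute the maximum count and scan counts from max down to 1, emitting each dict item whose count matches, reproducing the stable count-descending order without sorting.
import Mathlib
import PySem

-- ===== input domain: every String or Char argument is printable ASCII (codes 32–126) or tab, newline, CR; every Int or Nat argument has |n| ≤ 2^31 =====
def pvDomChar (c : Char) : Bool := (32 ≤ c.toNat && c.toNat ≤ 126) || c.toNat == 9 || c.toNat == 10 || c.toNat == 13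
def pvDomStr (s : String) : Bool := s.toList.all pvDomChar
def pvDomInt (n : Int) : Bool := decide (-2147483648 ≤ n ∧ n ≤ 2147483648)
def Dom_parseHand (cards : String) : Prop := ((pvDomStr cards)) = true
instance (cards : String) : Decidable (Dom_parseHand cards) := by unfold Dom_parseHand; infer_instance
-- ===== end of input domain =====

-- B replaces A's comparison sort (sorted by count, reverse=True) by a counting-sort sweep
-- from the maximum count down to 1 — an alternative algorithm of similar cost.

-- ===== PORT A =====
def parseHand (cards : String) : List (String × Int) :=
  -- card = ""; l = {}; for c in cards: amount = l.get(c,0)+1; l.update({c: amount}); card = c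
  let st := cards.toList.foldl
    (fun (st : PySem.Dict String Int × String) c =>
      let s := String.ofList [c]
      let amount := st.1.getD s 0 + 1
      (st.1.insert s amount, s))
    (PySem.Dict.empty, "")
  -- result = sorted(list(l.items()), key=lambda x: x[1], reverse=True)
  PySem.List.sorted st.1.items (fun x => x.2) true

-- ===== PORT B =====
def parseHand_alt (cards : String) : List (String × Int) :=
  let l := cards.toList.foldl
    (fun (d : PySem.Dict String Int) c =>
      let s := String.ofList [c]
      d.insert s (d.getD s 0 + 1))
    PySem.Dict.empty
  let items := l.items
  let m := items.foldl (fun acc p => if p.2 > acc then p.2 else acc) 0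
  (PySem.List.pyRange m 0 (-1)).foldl
    (fun acc k => items.foldl (fun acc2 p => if p.2 == k then acc2 ++ [p] else acc2) acc) []

-- ===== PRECONDITION & SPEC =====
def Spec_parseHand (cards : String) (out : List (String × Int)) : Prop := out = parseHand_alt cards
instance (cards : String) (out : List (String × Int)) : Decidable (Spec_parseHand cards out) := by unfold Spec_parseHand; infer_instance

-- ===== CLAIM (what is proved, stated in full; the proofs are below) =====
def Claim_equal_parseHand : Prop := ∀ (cards : String), Dom_parseHand cards → Spec_parseHand cards (parseHand cards)

-- ===== LEMMAS AND PROOFS =====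

-- descending range m..1 unfolds one step
theorem pvDownCons (n : Nat) :
    PySem.List.pyRange ((n+1:Nat):Int) 0 (-1) = ((n+1:Nat):Int) :: PySem.List.pyRange ((n:Nat):Int) 0 (-1) := by
  simp [PySem.List.pyRange, List.range_succ_eq_map]
  rcases Nat.eq_zero_or_pos n with h | h
  · subst h; simp
  · rw [if_pos h]; apply List.map_congr_left; intro k hk; simp [Function.comp]

theorem pvMemDown (n : Nat) (k : Int) (hk : k ∈ PySem.List.pyRange ((n:Nat):Int) 0 (-1)) :
    1 ≤ k ∧ k ≤ (n:Int) := by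
  induction n with
  | zero => simp [PySem.List.pyRange] at hk
  | succ n ih =>
    rw [pvDownCons] at hk
    rcases List.mem_cons.mp hk with h | h
    · subst h; constructor <;> push_cast <;> omega
    · have := ih h; push_cast at this ⊢; omega

-- insertBy skips a prefix it does not go before
theorem pvInsertBy_prefix {α : Type} (before : α → α → Bool) (x : α) (B L : List α)
    (h : ∀ b ∈ B, before x b = false) :
    PySem.List.insertBy before x (B ++ L) = B ++ PySem.List.insertBy before x L := by
  induction B with
  | nil => rfl
  | cons b bs ih =>
    simp only [List.cons_append, PySem.List.insertBy, h b (by simp), Bool.false_eq_true,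
      if_false, List.cons.injEq, true_and]
    exact ih (fun b hb => h b (by simp [hb]))

-- insertBy goes to the front when it precedes everything
theorem pvInsertBy_head {α : Type} (before : α → α → Bool) (x : α) (L : List α)
    (h : ∀ e ∈ L, before x e = true) :
    PySem.List.insertBy before x L = x :: L := by
  cases L with
  | nil => rfl
  | cons y ys => simp [PySem.List.insertBy, h y (by simp)]

-- inserting x into the descending-bucket concatenation appends x to its bucket
theorem pvIns (n : Nat) (x : String × Int) (xs : List (String × Int))
    (hx1 : 1 ≤ x.2) (hx2 : x.2 ≤ (n:Int)) :
    PySem.List.insertBy (fun a b => decide (b.2 < a.2)) x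
      ((PySem.List.pyRange ((n:Nat):Int) 0 (-1)).flatMap (fun k => xs.filter (fun p => p.2 == k)))
    = (PySem.List.pyRange ((n:Nat):Int) 0 (-1)).flatMap (fun k => (xs ++ [x]).filter (fun p => p.2 == k)) := by
  induction n with
  | zero => omega
  | succ n ih =>
    rw [pvDownCons]
    simp only [List.flatMap_cons, List.filter_append]
    by_cases hx : x.2 = ((n+1:Nat):Int)
    · -- x belongs to the top bucket: skip it, then insert before everything lower
      rw [pvInsertBy_prefix _ _ _ _ (by
        intro b hb
        have : b.2 = ((n+1:Nat):Int) := by simpa using (List.mem_filter.mp hb).2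
        simp [this, hx])]
      rw [pvInsertBy_head _ _ _ (by
        intro e he
        rcases List.mem_flatMap.mp he with ⟨k, hk, hek⟩
        have hk' := pvMemDown n k hk
        have : e.2 = k := by simpa using (List.mem_filter.mp hek).2
        simp only [decide_eq_true_eq]
        push_cast at hx; omega)]
      have hbx : (List.filter (fun p => p.2 == ((n+1:Nat):Int)) [x]) = [x] := by
        simp [hx]
      rw [hbx]
      have hlow : ((PySem.List.pyRange ((n:Nat):Int) 0 (-1)).flatMap
          (fun k => xs.filter (fun p => p.2 == k) ++ List.filter (fun p => p.2 == k) [x]))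
          = (PySem.List.pyRange ((n:Nat):Int) 0 (-1)).flatMap (fun k => xs.filter (fun p => p.2 == k)) := by
        apply List.flatMap_congr
        intro k hk
        have hk' := pvMemDown n k hk
        have : (List.filter (fun p => p.2 == k) [x]) = [] := by
          simp only [List.filter_cons, List.filter_nil]
          have : ¬ (x.2 = k) := by push_cast at hx; omega
          simp [this]
        simp [this]
      rw [hlow]
      simp
    · -- x belongs to a lower bucket
      have hx2' : x.2 ≤ (n:Int) := by push_cast at hx2 hx ⊢; omega
      rw [pvInsertBy_prefix _ _ _ _ (by
        intro b hb
        have : b.2 = ((n+1:Nat):Int) := by simpa using (List.mem_filter.mp hb).2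
        simp only [decide_eq_false_iff_not, not_lt, this]
        omega)]
      rw [ih hx2']
      have : (List.filter (fun p => p.2 == ((n+1:Nat):Int)) [x]) = [] := by
        have h2 : ¬ (x.2 = ((n:Int) + 1)) := by push_cast at hx; omega
        simp [h2]
      rw [this]
      simp

-- the reverse stable sort by count is the descending-bucket concatenation
theorem pvBuckets (n : Nat) (xs : List (String × Int))
    (h : ∀ p ∈ xs, 1 ≤ p.2 ∧ p.2 ≤ (n:Int)) :
    PySem.List.sorted xs (fun x => x.2) true
    = (PySem.List.pyRange ((n:Nat):Int) 0 (-1)).flatMap (fun k => xs.filter (fun p => p.2 == k)) := by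
  rw [PySem.List.sorted_rev_eq_foldl_insertBy]
  induction xs using List.reverseRecOn with
  | nil => simp
  | append_singleton xs x ih =>
    rw [List.foldl_append]
    simp only [List.foldl_cons, List.foldl_nil]
    rw [ih (fun p hp => h p (by simp [hp]))]
    exact pvIns n x xs (h x (by simp)).1 (h x (by simp)).2

-- sorted-by-count-reverse equals B's count-descending sweep, for any item list with counts ≥ 1
theorem pvMain (items : List (String × Int)) (h1 : ∀ p ∈ items, 1 ≤ p.2) :
    PySem.List.sorted items (fun x => x.2) true =
    (PySem.List.pyRange (items.foldl (fun acc p => if p.2 > acc then p.2 else acc) 0) 0 (-1)).foldl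
      (fun acc k => items.foldl (fun acc2 p => if p.2 == k then acc2 ++ [p] else acc2) acc) [] := by
  have hmax : items.foldl (fun acc p => if p.2 > acc then p.2 else acc) 0
      = items.foldl (fun acc (y : String × Int) => max acc y.2) 0 := by
    apply PySem.List.foldl_congr_mem
    intro acc x _
    simp only [max_def]
    split_ifs <;> omega
  obtain ⟨hm0, hub⟩ := PySem.List.le_foldl_max_int items (fun p => p.2) 0
  rw [hmax]
  have hcast : ((((items.foldl (fun acc (y : String × Int) => max acc y.2) 0).toNat : Nat)) : Int)
      = items.foldl (fun acc (y : String × Int) => max acc y.2) 0 := Int.toNat_of_nonneg hm0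
  rw [PySem.List.foldl_congr_mem _ _
    (fun acc k => acc ++ items.filter (fun p => p.2 == k)) _
    (fun acc k _ => PySem.List.foldl_append_if_eq_filter (fun p => p.2 == k) items acc)]
  rw [PySem.List.foldl_append_eq_flatMap, List.nil_append, ← hcast]
  exact pvBuckets _ items (fun p hp => ⟨h1 p hp, by rw [hcast]; exact hub p hp⟩)

theorem pvItemsPos (cs : List Char) (p : String × Int)
    (hp : p ∈ (PySem.Dict.counter (cs.map (fun c => String.ofList [c]))).items) : 1 ≤ p.2 := by
  rw [PySem.Dict.items_counter] at hp
  rcases List.mem_map.mp hp with ⟨k, hk, rfl⟩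
  have : k ∈ cs.map (fun c => String.ofList [c]) := by
    exact (PySem.Set.mem_ofList _ k).mp hk
  have := List.count_pos_iff.mpr this
  simp only []
  omega

-- ===== VERDICT (by name: the statement is the Claim_ definition above) =====
theorem pvDictFold (cs : List Char) :
    cs.foldl (fun (d : PySem.Dict String Int) c =>
        d.insert (String.ofList [c]) (d.getD (String.ofList [c]) 0 + 1)) PySem.Dict.empty
    = PySem.Dict.counter (cs.map (fun c => String.ofList [c])) := by
  rw [← PySem.Dict.foldl_insert_getD_add_one_eq_counter, List.foldl_map]

theorem pvPairFoldFst (cs : List Char) :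
    (cs.foldl (fun (st : PySem.Dict String Int × String) c =>
        let s := String.ofList [c]
        let amount := st.1.getD s 0 + 1
        (st.1.insert s amount, s)) (PySem.Dict.empty, "")).1
    = PySem.Dict.counter (cs.map (fun c => String.ofList [c])) := by
  rw [PySem.List.foldl_prod_mk
    (f := fun (d : PySem.Dict String Int) c => d.insert (String.ofList [c]) (d.getD (String.ofList [c]) 0 + 1))
    (g := fun (_ : String) c => String.ofList [c])]
  exact pvDictFold cs

theorem parseHand_spec : Claim_equal_parseHand := by
  intro cards _
  unfold Spec_parseHand parseHand parseHand_alt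
  simp only []
  rw [pvPairFoldFst, pvDictFold]
  exact pvMain _ (pvItemsPos cards.toList)
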